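-- pv_equiv track=rewrite | github.com/farhan-navas/conv-transformer | diffuser/preprocessing/label_speakers.py | _cap_repeated_phrases_any
-- ===== SOURCE A (Python) =====
-- from typing import List
--
-- def _cap_repeated_phrases_any(tokens: List[str], min_n=2, max_n=7, max_repeat=3) -> List[str]:
--     if len(tokens) < min_n * 2:
--         return tokens
--     out = tokens
--     for n in range(min_n, max_n + 1):
--         i, new_out = 0, []
--         while i < len(out):
--             win = out[i:i+n]
--             j, rep = i + n, 1
--             while j + n <= len(out) and out[j:j+n] == win:
--                 rep += 1
--                 j += n
--             new_out.extend(win * min(rep, max_repeat))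
--             i = j
--         out = new_out
--     return out
-- ===== SOURCE B (Python) =====
-- from typing import List
--
-- def _cap_repeated_phrases_any(tokens: List[str], min_n=2, max_n=7, max_repeat=3) -> List[str]:
--     if len(tokens) < min_n * 2:
--         return tokens
--     out = tokens
--     for n in range(min_n, max_n + 1):
--         chunks = [out[k:k+n] for k in range(0, len(out), n)]
--         out = [tok
--                for t, ch in enumerate(chunks)
--                if not (t >= max_repeat and
--                        all(chunks[s] == ch for s in range(t - max_repeat, t)))
--                for tok in ch]
--     return out
-- ===== Notes on version B (the rewrite author's own statement) =====
-- stated objective: alternative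
-- what changed: Replaces A's stateful forward scan (locate a window, count how many times it repeats ahead with a nested while, then jump past the run) by a stateless per-chunk rule: chunk the list at stride n and keep each chunk unless its previous max_repeat chunks all equal it, so no run length is ever computed.
-- outside the precondition, e.g. on _cap_repeated_phrases_any([], 0, 3, 2): A returns [], B raises ValueError
import Mathlib
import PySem

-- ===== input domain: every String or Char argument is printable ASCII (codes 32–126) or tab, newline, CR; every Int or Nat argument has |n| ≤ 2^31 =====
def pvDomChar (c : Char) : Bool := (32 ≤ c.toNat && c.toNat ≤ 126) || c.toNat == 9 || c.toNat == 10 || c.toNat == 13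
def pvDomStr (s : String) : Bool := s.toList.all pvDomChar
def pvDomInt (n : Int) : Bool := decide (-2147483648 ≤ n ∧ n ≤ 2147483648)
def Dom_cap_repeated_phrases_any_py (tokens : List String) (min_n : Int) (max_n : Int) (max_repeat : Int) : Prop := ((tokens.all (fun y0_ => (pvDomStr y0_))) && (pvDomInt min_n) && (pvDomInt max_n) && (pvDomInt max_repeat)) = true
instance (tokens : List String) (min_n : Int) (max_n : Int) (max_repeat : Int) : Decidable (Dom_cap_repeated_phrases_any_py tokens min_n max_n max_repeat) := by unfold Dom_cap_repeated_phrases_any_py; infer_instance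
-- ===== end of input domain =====

-- B replaces A's forward run-counting scan by a stateless per-chunk look-back test (keep a chunk
-- unless its previous max_repeat chunks all equal it); equivalence is proved on Pre_ (min_n ≥ 1,
-- or an empty n-range).

-- ===== PORT A =====
-- inner `while j + n <= len(out) and out[j:j+n] == win`; fuel only makes the loop total
def pvAInner (out : List String) (n : Int) (win : List String) : Nat → Int → Int → Int × Int
  | 0, j, rep => (j, rep)
  | fuel+1, j, rep =>
    if j + n ≤ (out.length : Int) ∧ PySem.List.slice out (some j) (some (j+n)) = win then
      pvAInner out n win fuel (j+n) (rep+1)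
    else (j, rep)

-- outer `while i < len(out)`; fuel only makes the loop total
def pvAOuter (out : List String) (n mr : Int) : Nat → Int → List String → List String
  | 0, _, new_out => new_out
  | fuel+1, i, new_out =>
    if i < (out.length : Int) then
      let win := PySem.List.slice out (some i) (some (i+n))
      let jr := pvAInner out n win (out.length+1) (i+n) 1
      pvAOuter out n mr fuel jr.1 (new_out ++ (List.replicate (min jr.2 mr).toNat win).flatten)
    else new_out

def cap_repeated_phrases_any_py (tokens : List String) (min_n : Int) (max_n : Int) (max_repeat : Int) : List String :=
  if (tokens.length : Int) < min_n * 2 then tokens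
  else
    (PySem.List.pyRange min_n (max_n + 1) 1).foldl
      (fun out n => pvAOuter out n max_repeat (out.length + 1) 0 []) tokens

-- ===== PORT B =====
-- one pass of B: chunk `out` at stride n, then keep chunk t unless `t >= max_repeat and
-- all(chunks[s] == ch for s in range(t - max_repeat, t))`; the comprehension is a flatMap.
-- chunks[s] is ported as pyGet? == some ch; the index s is always in range when evaluated
-- (Python's `and` short-circuits exactly like Bool.and here, both being value-level).
def pvBStep (out : List String) (n mr : Int) : List String :=
  let chunks := (PySem.List.pyRange 0 (out.length : Int) n).map
    (fun k => PySem.List.slice out (some k) (some (k+n)))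
  (PySem.List.enumerate chunks).flatMap (fun p =>
    if !(decide (mr ≤ p.1) && (PySem.List.pyRange (p.1 - mr) p.1 1).all
        (fun s => PySem.List.pyGet? chunks s == some p.2)) then p.2 else [])

def cap_repeated_phrases_any_py_alt (tokens : List String) (min_n : Int) (max_n : Int) (max_repeat : Int) : List String :=
  if (tokens.length : Int) < min_n * 2 then tokens
  else
    (PySem.List.pyRange min_n (max_n + 1) 1).foldl
      (fun out n => pvBStep out n max_repeat) tokens

-- ===== PRECONDITION & SPEC =====
-- Pre_ requires min_n ≥ 1 or an empty range max_n < min_n: otherwise a phrase length n ≤ 0 is iterated,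
-- on which A loops forever for nonempty tokens (and for empty tokens only accidentally terminates),
-- while B's range(0, len(out), n) raises ValueError for n = 0.
def Pre_cap_repeated_phrases_any_py (tokens : List String) (min_n : Int) (max_n : Int) (max_repeat : Int) : Prop :=
  1 ≤ min_n ∨ max_n < min_n
instance (tokens : List String) (min_n : Int) (max_n : Int) (max_repeat : Int) : Decidable (Pre_cap_repeated_phrases_any_py tokens min_n max_n max_repeat) := by unfold Pre_cap_repeated_phrases_any_py; infer_instance

def pvWitness_cap_repeated_phrases_any_py : List String × Int × Int × Int := (["a", "a", "b"], 1, 2, 2)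

def Spec_cap_repeated_phrases_any_py (tokens : List String) (min_n : Int) (max_n : Int) (max_repeat : Int) (out : List String) : Prop := out = cap_repeated_phrases_any_py_alt tokens min_n max_n max_repeat
instance (tokens : List String) (min_n : Int) (max_n : Int) (max_repeat : Int) (out : List String) : Decidable (Spec_cap_repeated_phrases_any_py tokens min_n max_n max_repeat out) := by unfold Spec_cap_repeated_phrases_any_py; infer_instance

-- ===== CLAIM (what is proved, stated in full; the proofs are below) =====
def Claim_equal_cap_repeated_phrases_any_py : Prop := ∀ (tokens : List String) (min_n : Int) (max_n : Int) (max_repeat : Int), Dom_cap_repeated_phrases_any_py tokens min_n max_n max_repeat → Pre_cap_repeated_phrases_any_py tokens min_n max_n max_repeat → Spec_cap_repeated_phrases_any_py tokens min_n max_n max_repeat (cap_repeated_phrases_any_py tokens min_n max_n max_repeat)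

-- ===== LEMMAS AND PROOFS =====

-- run-length of consecutive chunks equal to `win` at the head of the suffix
def pvRun (m : Nat) (win : List String) : List String → Nat
  | [] => 0
  | y :: ys => if win = y :: ys.take m then pvRun m win (ys.drop m) + 1 else 0
termination_by ys => ys.length
decreasing_by simp

-- reference one-pass description of one n-iteration (n = m+1)
def pvSpec (m : Nat) (mr : Int) : List String → List String
  | [] => []
  | x :: xs =>
    (List.replicate (min ((pvRun m (x :: xs.take m) (xs.drop m) : Int) + 1) mr).toNat (x :: xs.take m)).flatten
      ++ pvSpec m mr ((xs.drop m).drop ((pvRun m (x :: xs.take m) (xs.drop m)) * (m+1)))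
termination_by xs => xs.length
decreasing_by simp

def pvChunks (m : Nat) : List String → List (List String)
  | [] => []
  | x :: xs => (x :: xs.take m) :: pvChunks m (xs.drop m)
termination_by xs => xs.length
decreasing_by simp

def pvLead (c : List String) : List (List String) → Nat
  | [] => 0
  | d :: ds => if d = c then pvLead c ds + 1 else 0

def pvGroups : List (List String) → List (List String × Nat)
  | [] => []
  | c :: cs =>
    match pvGroups cs with
    | [] => [(c, 1)]
    | (d, k) :: rest => if c = d then (c, k+1) :: rest else (c, 1) :: (d, k) :: rest

-- Nat-level form of B's keep test: keep chunk t unless its previous mr chunks all equal it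
def pvKeepN (cs : List (List String)) (mr : Nat) (t : Nat) : Bool :=
  !(decide (mr ≤ t) && decide (∀ s, t - mr ≤ s → s < t → cs.getD s [] = cs.getD t []))

def pvKeptFlat (mr : Nat) (cs : List (List String)) : List String :=
  (List.range cs.length).flatMap (fun t => if pvKeepN cs mr t then cs.getD t [] else [])

theorem pvAInner_eq (out : List String) (m : Nat) (win : List String) (hwin : win.length = m+1) :
    ∀ (fuel j : Nat) (rep : Int), out.length ≤ j + fuel →
      pvAInner out ((m:Int)+1) win fuel (j:Int) rep =
        (((j + (m+1) * pvRun m win (out.drop j) : Nat) : Int), rep + (pvRun m win (out.drop j) : Int)) := by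
  intro fuel
  induction fuel with
  | zero =>
    intro j rep hj
    have hd : out.drop j = [] := List.drop_eq_nil_of_le (by omega)
    simp [pvAInner, hd, pvRun]
  | succ fuel ihf =>
    intro j rep hj
    have hcast : (j:Int) + ((m:Int)+1) = ((j + (m+1) : Nat) : Int) := by push_cast; ring
    rw [pvAInner, hcast, PySem.List.slice_natCast, Nat.add_sub_cancel_left]
    cases hys : out.drop j with
    | nil =>
      rw [if_neg (by intro hh; rw [← hh.2] at hwin; simp at hwin)]
      simp [pvRun]
    | cons y ys' =>
      have hlendrop : (y :: ys').length = out.length - j := by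
        rw [← hys]; exact List.length_drop ..
      by_cases hc : List.take (m+1) (y :: ys') = win
      · have hml : m + 1 ≤ (y :: ys').length := by
          have := congrArg List.length hc
          rw [List.length_take, hwin] at this
          omega
        simp only [List.length_cons] at hlendrop hml
        rw [if_pos ⟨by push_cast; omega, hc⟩]
        rw [ihf (j + (m+1)) (rep + 1) (by omega)]
        have hdd : List.drop (j + (m+1)) out = List.drop m ys' := by
          rw [← List.drop_drop, hys, List.drop_succ_cons]
        have hrun : pvRun m win (y :: ys') = pvRun m win (List.drop m ys') + 1 := by
          rw [pvRun, if_pos (by rw [← hc, List.take_succ_cons])]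
        rw [hdd, hrun]
        simp only [Prod.mk.injEq]
        constructor
        · congr 1; ring
        · push_cast; ring
      · rw [if_neg (fun hh => hc hh.2)]
        have hrun : pvRun m win (y :: ys') = 0 := by
          rw [pvRun, if_neg (fun hh => hc (by rw [List.take_succ_cons, ← hh]))]
        rw [hrun]
        simp

theorem pvAOuter_eq (out : List String) (m : Nat) (mr : Int) :
    ∀ (fuel j : Nat) (acc : List String), out.length ≤ j + fuel →
      pvAOuter out ((m:Int)+1) mr fuel (j:Int) acc = acc ++ pvSpec m mr (out.drop j) := by
  intro fuel
  induction fuel with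
  | zero =>
    intro j acc hj
    have hd : out.drop j = [] := List.drop_eq_nil_of_le (by omega)
    simp [pvAOuter, hd, pvSpec]
  | succ fuel ihf =>
    intro j acc hj
    simp only [pvAOuter]
    by_cases hlt : (j:Int) < (out.length : Int)
    · rw [if_pos hlt]
      have hjlt : j < out.length := by exact_mod_cast hlt
      cases hys : out.drop j with
      | nil =>
        exfalso
        have h0 := congrArg List.length hys
        rw [List.length_drop] at h0
        simp at h0
        omega
      | cons x xs =>
        have hlendrop : xs.length + 1 = out.length - j := by
          have h0 := congrArg List.length hys
          rw [List.length_drop] at h0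
          simpa using h0.symm
        have hcast : (j:Int) + ((m:Int)+1) = ((j + (m+1) : Nat) : Int) := by push_cast; ring
        have hwin_eq : PySem.List.slice out (some (j:Int)) (some ((j:Int) + ((m:Int)+1))) = x :: xs.take m := by
          rw [hcast, PySem.List.slice_natCast, Nat.add_sub_cancel_left, hys, List.take_succ_cons]
        rw [hwin_eq]
        have hdd : List.drop (j + (m+1)) out = List.drop m xs := by
          rw [← List.drop_drop, hys, List.drop_succ_cons]
        by_cases hfull : m ≤ xs.length
        · have hwl : (x :: xs.take m).length = m + 1 := by
            simp [List.length_take]; omega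
          rw [hcast, pvAInner_eq out m (x :: xs.take m) hwl (out.length+1) (j + (m+1)) 1 (by omega)]
          dsimp only
          rw [hdd]
          rw [ihf (j + (m+1) + (m+1) * pvRun m (x :: xs.take m) (List.drop m xs)) _ (by omega)]
          rw [← List.drop_drop, hdd, Nat.mul_comm (m+1)]
          rw [pvSpec, List.append_assoc,
            Int.add_comm 1 ((pvRun m (x :: xs.take m) (List.drop m xs) : Nat) : Int)]
        · have hxt : xs.take m = xs := List.take_of_length_le (by omega)
          have hxd : List.drop m xs = [] := List.drop_eq_nil_of_le (by omega)
          rw [pvAInner, if_neg (by intro hh; have h1 := hh.1; push_cast at h1; omega)]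
          rw [hcast, ihf (j + (m+1)) _ (by omega), hdd, hxd]
          dsimp only
          simp [pvSpec, pvRun, hxd]
    · rw [if_neg hlt]
      have hd : out.drop j = [] := List.drop_eq_nil_of_le (by omega)
      simp [hd, pvSpec]

theorem pvRange_nil (a b s : Int) (hs : 0 < s) (hab : b ≤ a) : PySem.List.pyRange a b s = [] := by
  rw [PySem.List.pyRange_of_pos _ _ hs, if_neg (by omega)]
  simp

theorem pvRange_cons (a b s : Int) (hs : 0 < s) (hab : a < b) :
    PySem.List.pyRange a b s = a :: PySem.List.pyRange (a+s) b s := by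
  rw [PySem.List.pyRange_of_pos _ _ hs, PySem.List.pyRange_of_pos _ _ hs, if_pos hab]
  by_cases h2 : a + s < b
  · rw [if_pos h2]
    have key : b - a + s - 1 = (b - (a+s) + s - 1) + 1*s := by ring
    have hnn : 0 ≤ (b - (a+s) + s - 1)/s := Int.ediv_nonneg (by omega) (by omega)
    rw [key, Int.add_mul_ediv_right _ _ (by omega : s ≠ 0),
      show ((b - (a+s) + s - 1)/s + 1).toNat = ((b - (a+s) + s - 1)/s).toNat + 1 from by omega,
      List.range_succ_eq_map]
    simp only [List.map_cons, List.map_map]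
    congr 1
    · simp
    · apply List.map_congr_left
      intro k _
      simp only [Function.comp_apply]
      push_cast
      ring
  · rw [if_neg h2]
    have h0 : (b - a + s - 1) / s = 1 := by
      have key : b - a + s - 1 = (b - a - 1) + 1*s := by ring
      rw [key, Int.add_mul_ediv_right _ _ (by omega : s ≠ 0),
        Int.ediv_eq_zero_of_lt (by omega) (by omega)]
      norm_num
    rw [h0]
    simp [List.range_one]

theorem pvChunks_eq (out : List String) (m : Nat) :
    ∀ (j : Nat),
      (PySem.List.pyRange (j:Int) (out.length : Int) ((m:Int)+1)).map
        (fun k => PySem.List.slice out (some k) (some (k+((m:Int)+1)))) = pvChunks m (out.drop j) := by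
  intro j
  induction hN : out.length - j using Nat.strong_induction_on generalizing j with
  | _ N ih =>
    by_cases hj : j < out.length
    · rw [pvRange_cons (j:Int) (out.length:Int) ((m:Int)+1) (by omega) (by exact_mod_cast hj),
        List.map_cons]
      cases hys : out.drop j with
      | nil =>
        exfalso
        have h0 := congrArg List.length hys
        rw [List.length_drop] at h0
        simp at h0
        omega
      | cons x xs =>
        have hcast : (j:Int) + ((m:Int)+1) = ((j + (m+1) : Nat):Int) := by push_cast; ring
        rw [hcast, PySem.List.slice_natCast, Nat.add_sub_cancel_left, hys, List.take_succ_cons,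
          ih (out.length - (j + (m+1))) (by omega) (j + (m+1)) rfl, pvChunks]
        congr 1
        rw [← List.drop_drop, hys, List.drop_succ_cons]
    · rw [pvRange_nil _ _ _ (by omega) (by omega)]
      have hd : out.drop j = [] := List.drop_eq_nil_of_le (by omega)
      simp [hd, pvChunks]

theorem pvGroups_cons (cs : List (List String)) : ∀ (c : List String),
    pvGroups (c :: cs) = (c, pvLead c cs + 1) :: pvGroups (cs.drop (pvLead c cs)) := by
  induction cs with
  | nil => intro c; simp [pvGroups, pvLead]
  | cons d ds ih =>
    intro c
    show (match pvGroups (d :: ds) with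
      | [] => [(c, 1)]
      | (e, k) :: rest => if c = e then (c, k+1) :: rest else (c, 1) :: (e, k) :: rest) = _
    rw [ih d]
    by_cases h : c = d
    · subst h
      simp [pvLead, List.drop_succ_cons]
    · have h' : d ≠ c := fun hh => h hh.symm
      simp [pvLead, h, h', ih d]

theorem pvLead_chunks (m : Nat) (win : List String) : ∀ (ys : List String),
    pvLead win (pvChunks m ys) = pvRun m win ys := by
  intro ys
  induction hN : ys.length using Nat.strong_induction_on generalizing ys with
  | _ N ih =>
    match ys with
    | [] => simp [pvChunks, pvRun, pvLead]
    | y :: ys' =>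
      rw [pvChunks, pvRun, pvLead]
      by_cases h : win = y :: ys'.take m
      · rw [if_pos h.symm, if_pos h]
        rw [ih ((ys'.drop m).length) (by simp at hN ⊢; omega) _ rfl]
      · rw [if_neg (fun hh => h hh.symm), if_neg h]

theorem pvChunks_drop_run (m : Nat) (win : List String) : ∀ (ys : List String),
    (pvChunks m ys).drop (pvRun m win ys) = pvChunks m (ys.drop ((pvRun m win ys) * (m+1))) := by
  intro ys
  induction hN : ys.length using Nat.strong_induction_on generalizing ys with
  | _ N ih =>
    match ys with
    | [] => simp [pvChunks, pvRun]
    | y :: ys' =>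
      rw [pvChunks, pvRun]
      by_cases h : win = y :: ys'.take m
      · rw [if_pos h]
        rw [List.drop_succ_cons, ih ((ys'.drop m).length) (by simp at hN ⊢; omega) _ rfl]
        congr 1
        rw [List.drop_drop,
          show (pvRun m win (ys'.drop m) + 1) * (m+1) = (pvRun m win (ys'.drop m) * (m+1) + m) + 1 from by ring,
          List.drop_succ_cons, Nat.add_comm m]
      · rw [if_neg h]
        simp [pvChunks]

theorem pvGroups_flat (m : Nat) (mr : Int) : ∀ (out : List String),
    (pvGroups (pvChunks m out)).flatMap
      (fun g => (List.replicate (min (g.2 : Int) mr).toNat g.1).flatten) = pvSpec m mr out := by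
  intro out
  induction hN : out.length using Nat.strong_induction_on generalizing out with
  | _ N ih =>
    match out with
    | [] => simp [pvChunks, pvGroups, pvSpec]
    | x :: xs =>
      rw [pvChunks, pvGroups_cons, pvLead_chunks, List.flatMap_cons, pvChunks_drop_run,
        ih (((xs.drop m).drop (pvRun m (x :: xs.take m) (xs.drop m) * (m+1))).length)
          (by simp at hN ⊢; omega) _ rfl, pvSpec]
      norm_num

-- ---- B-side: the look-back filter equals the run-capped expansion ----

-- the first pvLead+1 elements are a constant run, and the element after it (if any) differs
theorem pvLead_split (c : List String) : ∀ (rest : List (List String)),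
    c :: rest = List.replicate (pvLead c rest + 1) c ++ rest.drop (pvLead c rest) := by
  intro rest
  induction rest generalizing c with
  | nil => simp [pvLead]
  | cons d ds ih =>
    by_cases h : d = c
    · subst h
      rw [pvLead, if_pos rfl, List.replicate_succ, List.cons_append, List.drop_succ_cons]
      exact congrArg (d :: ·) (ih d)
    · rw [pvLead, if_neg h]
      simp

theorem pvLead_boundary (c : List String) : ∀ (rest : List (List String)),
    rest.drop (pvLead c rest) ≠ [] → (rest.drop (pvLead c rest)).getD 0 [] ≠ c := by
  intro rest
  induction rest generalizing c with
  | nil => simp [pvLead]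
  | cons d ds ih =>
    by_cases h : d = c
    · subst h
      rw [pvLead, if_pos rfl, List.drop_succ_cons]
      exact ih d
    · rw [pvLead, if_neg h]
      intro _
      simpa using h

theorem pvGetD_left (k : Nat) (c : List String) (tl : List (List String)) (t : Nat) (ht : t < k) :
    (List.replicate k c ++ tl).getD t [] = c := by
  rw [List.getD_eq_getElem?_getD, List.getElem?_append_left (by simpa using ht),
    List.getElem?_replicate, if_pos ht]
  rfl

theorem pvGetD_right (k : Nat) (c : List String) (tl : List (List String)) (s : Nat) :
    (List.replicate k c ++ tl).getD (k + s) [] = tl.getD s [] := by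
  rw [List.getD_eq_getElem?_getD, List.getElem?_append_right (by simp),
    List.getD_eq_getElem?_getD]
  congr 1
  simp

theorem pvKeepN_lt (k : Nat) (c : List String) (tl : List (List String)) (mr t : Nat)
    (ht : t < k) : pvKeepN (List.replicate k c ++ tl) mr t = decide (t < mr) := by
  by_cases hm : mr ≤ t
  · have hall : ∀ s, t - mr ≤ s → s < t → (List.replicate k c ++ tl).getD s [] = (List.replicate k c ++ tl).getD t [] := by
      intro s _ hs2
      rw [pvGetD_left k c tl s (by omega), pvGetD_left k c tl t ht]
    have hF : pvKeepN (List.replicate k c ++ tl) mr t = false := by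
      rw [pvKeepN, decide_eq_true hm, decide_eq_true hall]
      rfl
    rw [hF, eq_comm, decide_eq_false_iff_not]
    omega
  · have hT : pvKeepN (List.replicate k c ++ tl) mr t = true := by
      rw [pvKeepN, decide_eq_false hm]
      rfl
    rw [hT, eq_comm, decide_eq_true_eq]
    omega

theorem pvKeepN_shift (k : Nat) (c : List String) (tl : List (List String)) (mr t : Nat)
    (hk : 1 ≤ k) (ht : t < tl.length) (hb : tl.getD 0 [] ≠ c) :
    pvKeepN (List.replicate k c ++ tl) mr (k + t) = pvKeepN tl mr t := by
  by_cases h1 : mr ≤ t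
  · have h2 : mr ≤ k + t := by omega
    have hiff : (∀ s, (k + t) - mr ≤ s → s < k + t → (List.replicate k c ++ tl).getD s [] = (List.replicate k c ++ tl).getD (k+t) [])
        ↔ (∀ s, t - mr ≤ s → s < t → tl.getD s [] = tl.getD t []) := by
      constructor
      · intro hP s hs1 hs2
        have := hP (k + s) (by omega) (by omega)
        rwa [pvGetD_right, pvGetD_right] at this
      · intro hP s hs1 hs2
        have hks : k ≤ s := by omega
        obtain ⟨u, rfl⟩ : ∃ u, s = k + u := ⟨s - k, by omega⟩
        rw [pvGetD_right, pvGetD_right]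
        exact hP u (by omega) (by omega)
    rw [pvKeepN, pvKeepN, decide_eq_true h2, decide_eq_true h1, Bool.true_and, Bool.true_and,
      decide_eq_decide.mpr hiff]
  · have hR : pvKeepN tl mr t = true := by
      simp [pvKeepN, h1]
    rw [hR]
    by_cases hmk : mr ≤ k + t
    · have hnot : ¬ (∀ s, (k + t) - mr ≤ s → s < k + t → (List.replicate k c ++ tl).getD s [] = (List.replicate k c ++ tl).getD (k+t) []) := by
        intro hP
        have hgt : (List.replicate k c ++ tl).getD (k+t) [] = tl.getD t [] := pvGetD_right k c tl t
        have hc1 := hP (k-1) (by omega) (by omega)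
        rw [pvGetD_left k c tl (k-1) (by omega), hgt] at hc1
        by_cases ht0 : t = 0
        · subst ht0
          exact hb hc1.symm
        · have hc2 := hP k (by omega) (by omega)
          have hk0 : (List.replicate k c ++ tl).getD k [] = tl.getD 0 [] := by
            simpa using pvGetD_right k c tl 0
          rw [hk0, hgt] at hc2
          exact hb (hc2.trans hc1.symm)
      rw [pvKeepN, decide_eq_true hmk, decide_eq_false hnot]
      rfl
    · rw [pvKeepN, decide_eq_false hmk]
      rfl

theorem pvRangeIf (mr : Nat) (c : List String) : ∀ (k : Nat),
    (List.range k).flatMap (fun t => if t < mr then c else []) = (List.replicate (min k mr) c).flatten := by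
  intro k
  induction k with
  | zero => simp
  | succ k ih =>
    rw [List.range_succ, List.flatMap_append, ih]
    by_cases h : k < mr
    · rw [show min (k+1) mr = min k mr + 1 from by omega, List.replicate_succ',
        List.flatten_append]
      simp [h]
    · rw [show min (k+1) mr = min k mr from by omega]
      simp [h]

theorem pvKeptFlat_eq (mr : Nat) : ∀ (cs : List (List String)),
    pvKeptFlat mr cs = (pvGroups cs).flatMap (fun g => (List.replicate (min g.2 mr) g.1).flatten) := by
  intro cs
  induction hN : cs.length using Nat.strong_induction_on generalizing cs with
  | _ N ih =>
    match cs with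
    | [] => simp [pvKeptFlat, pvGroups]
    | c :: rest =>
      have hsplit := pvLead_split c rest
      set lead := pvLead c rest with hlead
      set tl := rest.drop lead with htl
      set k := lead + 1 with hkk
      have hlen : (c :: rest).length = k + tl.length := by
        have := congrArg List.length hsplit
        simpa using this
      rw [pvGroups_cons, ← hlead, ← htl, List.flatMap_cons]
      rw [show pvKeptFlat mr (c :: rest) = pvKeptFlat mr (List.replicate k c ++ tl) from by rw [← hsplit]]
      have hlen2 : (List.replicate k c ++ tl).length = k + tl.length := by simp
      rw [pvKeptFlat, hlen2, List.range_add, List.flatMap_append, List.flatMap_map]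
      have hpart1 : (List.range k).flatMap
          (fun t => if pvKeepN (List.replicate k c ++ tl) mr t then (List.replicate k c ++ tl).getD t [] else [])
          = (List.replicate (min k mr) c).flatten := by
        rw [← pvRangeIf mr c k]
        apply List.flatMap_congr
        intro t hmem
        have ht : t < k := List.mem_range.mp hmem
        rw [pvKeepN_lt k c tl mr t ht, pvGetD_left k c tl t ht]
        simp
      have hpart2 : (List.range tl.length).flatMap
          (fun t => if pvKeepN (List.replicate k c ++ tl) mr (k + t) then (List.replicate k c ++ tl).getD (k + t) [] else [])
          = pvKeptFlat mr tl := by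
        rw [pvKeptFlat]
        apply List.flatMap_congr
        intro t hmem
        have ht : t < tl.length := List.mem_range.mp hmem
        have hne : tl ≠ [] := by intro hh; rw [hh] at ht; simp at ht
        rw [pvKeepN_shift k c tl mr t (by omega) ht (pvLead_boundary c rest (htl ▸ hne)),
          pvGetD_right k c tl t]
      rw [hpart1, hpart2, ih tl.length (by omega) tl rfl]

-- bridge: B's ported predicate over Int indices is the Nat-level keep test
theorem pvBflat_eq (cs : List (List String)) (mr : Int) :
    (PySem.List.enumerate cs).flatMap (fun p =>
      if !(decide (mr ≤ p.1) && (PySem.List.pyRange (p.1 - mr) p.1 1).all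
          (fun s => PySem.List.pyGet? cs s == some p.2)) then p.2 else [])
    = pvKeptFlat mr.toNat cs := by
  rw [PySem.List.enumerate_eq_map_pyRange cs ([] : List String),
    show PySem.List.len cs = ((cs.length : Nat) : Int) from by simp [PySem.List.len],
    PySem.List.pyRange_zero_natCast, List.map_map, List.flatMap_map, pvKeptFlat]
  apply List.flatMap_congr
  intro t hmem
  have ht : t < cs.length := List.mem_range.mp hmem
  simp only [Function.comp_apply, PySem.List.pyGetD_natCast]
  congr 1
  have hdec : decide (mr ≤ (t:Int)) = decide (mr.toNat ≤ t) := by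
    rw [decide_eq_decide]; omega
  by_cases hm : mr.toNat ≤ t
  · have hm' : mr ≤ (t:Int) := by omega
    have hall : ((PySem.List.pyRange ((t:Int) - mr) (t:Int) 1).all
        (fun s => PySem.List.pyGet? cs s == some (cs.getD t []))) =
        decide (∀ s, t - mr.toNat ≤ s → s < t → cs.getD s [] = cs.getD t []) := by
      rw [Bool.eq_iff_iff, List.all_eq_true, decide_eq_true_iff]
      constructor
      · intro hA s hs1 hs2
        have hsm : ((s:Int)) ∈ PySem.List.pyRange ((t:Int) - mr) (t:Int) 1 := by
          rw [PySem.List.mem_pyRange_one]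
          omega
        have := hA _ hsm
        rw [PySem.List.pyGet?_natCast, beq_iff_eq] at this
        have hgs : cs[s]? = some cs[s] := List.getElem?_eq_getElem (by omega)
        rw [hgs] at this
        rw [List.getD_eq_getElem?_getD, hgs]
        exact Option.some.inj this
      · intro hP s hsm
        rw [PySem.List.mem_pyRange_one] at hsm
        obtain ⟨u, rfl⟩ : ∃ u : Nat, s = (u : Int) := ⟨s.toNat, by omega⟩
        rw [PySem.List.pyGet?_natCast, beq_iff_eq,
          List.getElem?_eq_getElem (by omega : u < cs.length)]
        have h2 := hP u (by omega) (by omega)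
        rw [List.getD_eq_getElem?_getD, List.getElem?_eq_getElem (by omega : u < cs.length)] at h2
        simp only [Option.getD_some] at h2
        exact congrArg some h2
    rw [pvKeepN, hdec, hall]
  · have hm' : ¬ mr ≤ (t:Int) := by omega
    simp [pvKeepN, hm, hm']

theorem pvMin_toNat (a : Nat) (b : Int) : (min (a:Int) b).toNat = min a b.toNat := by omega

theorem pvB_step_spec (out : List String) (n mr : Int) (hn : 1 ≤ n) :
    pvBStep out n mr = pvSpec (n - 1).toNat mr out := by
  obtain ⟨m, rfl⟩ : ∃ m : Nat, n = (m:Int)+1 := ⟨(n-1).toNat, by omega⟩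
  have hm : ((m:Int) + 1 - 1).toNat = m := by omega
  rw [hm]
  simp only [pvBStep]
  have hch := pvChunks_eq out m 0
  rw [Nat.cast_zero, List.drop_zero] at hch
  rw [hch, pvBflat_eq, pvKeptFlat_eq, ← pvGroups_flat m mr out]
  apply List.flatMap_congr
  intro g _
  rw [pvMin_toNat]

theorem pvA_step_spec (out : List String) (n mr : Int) (hn : 1 ≤ n) :
    pvAOuter out n mr (out.length + 1) 0 [] = pvSpec (n - 1).toNat mr out := by
  obtain ⟨m, rfl⟩ : ∃ m : Nat, n = (m:Int)+1 := ⟨(n-1).toNat, by omega⟩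
  have hm : ((m:Int) + 1 - 1).toNat = m := by omega
  rw [hm, show (0:Int) = ((0:Nat):Int) from rfl,
    pvAOuter_eq out m mr (out.length+1) 0 [] (by omega)]
  simp

-- ===== VERDICT (by name: the statement is the Claim_ definition above) =====
theorem cap_repeated_phrases_any_py_spec : Claim_equal_cap_repeated_phrases_any_py := by
  intro tokens min_n max_n max_repeat _ hpre
  unfold Spec_cap_repeated_phrases_any_py cap_repeated_phrases_any_py cap_repeated_phrases_any_py_alt
  rcases hpre with h1 | h2
  · split
    · rfl
    · apply PySem.List.foldl_congr_mem
      intro acc n hn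
      have := (PySem.List.mem_pyRange_one.mp hn).1
      rw [pvA_step_spec acc n max_repeat (le_trans h1 this),
        pvB_step_spec acc n max_repeat (le_trans h1 this)]
  · rw [PySem.List.pyRange_one_eq_nil (by omega)]
    split <;> rfl
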